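-- pv_equiv track=rewrite | github.com/nikoladze/aoc2023 | day25/solver.py | try_partition
-- ===== SOURCE A (Python) =====
-- from collections import defaultdict, deque
--
-- def try_partition(graph, node1, node2):
--     cluster1, cluster2 = set(), set()
--     q = deque([(node1, cluster1), (node2, cluster2)])
--     seen = set()
--     while q:
--         node, cluster = q.popleft()
--         if node in seen:
--             continue
--         seen.add(node)
--         cluster.add(node)
--         if not node in graph:
--             continue
--         for child in graph[node]:
--             if child in seen:
--                 continue
--             q.append((child, cluster))
--     return cluster1, cluster2
-- ===== SOURCE B (Python) =====
-- def try_partition(graph, node1, node2):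
--     cluster1, cluster2 = set(), set()
--     seen = set()
--     f1, f2 = [node1], [node2]
--     while f1 or f2:
--         g1, g2 = [], []
--         for n in f1:
--             if n not in seen:
--                 seen.add(n)
--                 cluster1.add(n)
--                 g1.extend(c for c in graph.get(n, []) if c not in seen)
--         for n in f2:
--             if n not in seen:
--                 seen.add(n)
--                 cluster2.add(n)
--                 g2.extend(c for c in graph.get(n, []) if c not in seen)
--         f1, f2 = g1, g2
--     return cluster1, cluster2
-- ===== Notes on version B (the rewrite author's own statement) =====
-- stated objective: alternative
-- what changed: Replaces A's single interleaved FIFO deque of (node, cluster-object) pairs (relying on Python object aliasing to grow the right set) with a level-synchronous flood: two plain frontier lists expanded round by round, claiming unseen nodes of frontier1 into cluster1 and then of frontier2 into cluster2 against a shared seen set.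
import Mathlib
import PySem

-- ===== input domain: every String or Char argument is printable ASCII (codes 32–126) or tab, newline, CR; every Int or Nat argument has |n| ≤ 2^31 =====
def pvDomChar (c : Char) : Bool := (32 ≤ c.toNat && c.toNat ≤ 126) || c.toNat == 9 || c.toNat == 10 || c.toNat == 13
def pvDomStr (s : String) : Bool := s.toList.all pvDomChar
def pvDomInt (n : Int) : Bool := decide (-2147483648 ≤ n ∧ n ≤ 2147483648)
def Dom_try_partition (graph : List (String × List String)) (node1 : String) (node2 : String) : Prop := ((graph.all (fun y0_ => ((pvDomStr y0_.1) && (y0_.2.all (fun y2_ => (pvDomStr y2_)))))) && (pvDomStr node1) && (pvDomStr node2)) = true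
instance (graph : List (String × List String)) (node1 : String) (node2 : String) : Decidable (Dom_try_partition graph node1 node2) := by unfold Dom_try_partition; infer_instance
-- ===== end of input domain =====

-- B replaces A's single interleaved deque of (node, cluster-object) pairs by a level-synchronous
-- flood with two plain frontier lists and no tagged queue entries (objective: alternative, same cost).

-- Node universe and total adjacency size: used ONLY as the termination measure of the loop ports.
def tpU (graph : List (String × List String)) : PySem.Set String :=
  PySem.Set.ofList (graph.map Prod.fst ++ (graph.map Prod.snd).flatten)

def tpM (graph : List (String × List String)) : Nat :=
  ((graph.map Prod.snd).flatten).length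

-- Termination facts the ports cite in `decreasing_by` (claiming an unseen graph node shrinks tpU.diff seen).
theorem tpDiff_sublist (U seen : List String) (n : String) (hs : seen.contains n = false) :
    (PySem.Set.diff U (PySem.Set.add seen n)).Sublist (PySem.Set.diff U seen) := by
  unfold PySem.Set.diff PySem.Set.add
  rw [if_neg (by simpa using hs)]
  refine List.monotone_filter_right U ?_
  intro a ha
  simp only [Bool.not_eq_eq_eq_not, Bool.not_true] at ha ⊢
  simp at ha ⊢
  exact ha.1

theorem tpDiff_add_le (U seen : List String) (n : String) :
    (PySem.Set.diff U (PySem.Set.add seen n)).length ≤ (PySem.Set.diff U seen).length := by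
  by_cases h : seen.contains n = true
  · unfold PySem.Set.add
    rw [if_pos (by simpa using h)]
  · exact List.Sublist.length_le (tpDiff_sublist U seen n (by simpa using h))

theorem tpDiff_add_lt (U seen : List String) (n : String) (hU : n ∈ U)
    (hs : seen.contains n = false) :
    (PySem.Set.diff U (PySem.Set.add seen n)).length < (PySem.Set.diff U seen).length := by
  have hsub := tpDiff_sublist U seen n hs
  refine Nat.lt_of_le_of_ne (List.Sublist.length_le hsub) ?_
  intro hlen
  have heq := (List.Sublist.length_eq hsub).mp hlen
  have h1 : n ∈ PySem.Set.diff U seen := by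
    unfold PySem.Set.diff
    rw [List.mem_filter]
    refine ⟨hU, by simpa using hs⟩
  rw [← heq] at h1
  unfold PySem.Set.diff PySem.Set.add at h1
  rw [if_neg (by simpa using hs)] at h1
  rw [List.mem_filter] at h1
  simp at h1

theorem tpGet_some (graph : List (String × List String)) (n : String) (ch : List String)
    (h : (PySem.Dict.mk graph).get? n = some ch) :
    n ∈ tpU graph ∧ ch.length ≤ tpM graph := by
  unfold PySem.Dict.get? at h
  obtain ⟨p, hfind, hp⟩ := Option.map_eq_some_iff.mp h
  have hmem := List.mem_of_find?_eq_some hfind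
  have hkey : p.1 = n := by
    have := List.find?_some hfind
    simpa using this
  constructor
  · unfold tpU
    rw [PySem.Set.mem_ofList]
    exact List.mem_append.mpr (Or.inl (hkey ▸ List.mem_map.mpr ⟨p, hmem, rfl⟩))
  · unfold tpM
    have hm : p.2 ∈ graph.map Prod.snd := List.mem_map.mpr ⟨p, hmem, rfl⟩
    have hsub : p.2.Sublist ((graph.map Prod.snd).flatten) := List.sublist_flatten_of_mem hm
    simpa [hp] using List.Sublist.length_le hsub

-- ===== PORT A =====
-- A's while loop over the deque of (node, cluster) pairs; the aliased cluster-set object of an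
-- entry is ported as a Bool tag (true = cluster1). The inner `for child … q.append` becomes the
-- filter/map suffix (`seen` does not change during that for loop).
def tpLoopA (graph : List (String × List String)) :
    List (String × Bool) → PySem.Set String → PySem.Set String → PySem.Set String →
    PySem.Set String × PySem.Set String
  | [], _, c1, c2 => (c1, c2)
  | (node, tag) :: rest, seen, c1, c2 =>
    if hseen : PySem.Set.contains seen node then
      tpLoopA graph rest seen c1 c2
    else
      let seen' := PySem.Set.add seen node
      let c1' := if tag then PySem.Set.add c1 node else c1
      let c2' := if tag then c2 else PySem.Set.add c2 node
      match hget : (PySem.Dict.mk graph).get? node with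
      | none => tpLoopA graph rest seen' c1' c2'
      | some children =>
        tpLoopA graph
          (rest ++ (children.filter (fun c => !PySem.Set.contains seen' c)).map (fun c => (c, tag)))
          seen' c1' c2'
termination_by q seen _ _ => (PySem.Set.diff (tpU graph) seen).length * (tpM graph + 2) + q.length
decreasing_by
  · simp
  · have h := tpDiff_add_le (tpU graph) seen node
    have := Nat.mul_le_mul_right (tpM graph + 2) h
    simp only [List.length_cons]
    omega
  · have h := tpGet_some graph node children hget
    have hlt := tpDiff_add_lt (tpU graph) seen node h.1 (by simpa using hseen)
    have hlen : ((children.filter (fun c => !PySem.Set.contains (PySem.Set.add seen node) c)).map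
        (fun c => (c, tag))).length ≤ tpM graph := by
      rw [List.length_map]
      exact le_trans (List.length_filter_le _ _) h.2
    simp only [List.length_append, List.length_cons]
    have h2 : (PySem.Set.diff (tpU graph) (PySem.Set.add seen node)).length + 1
        ≤ (PySem.Set.diff (tpU graph) seen).length := hlt
    nlinarith [h2, hlen]

def try_partition (graph : List (String × List String)) (node1 : String) (node2 : String) :
    List String × List String :=
  tpLoopA graph [(node1, true), (node2, false)] PySem.Set.empty PySem.Set.empty PySem.Set.empty

-- ===== PORT B =====
-- Source B's inner `for n in f: …` claiming pass; state (seen, cluster, next-frontier g);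
-- graph.get(n, []) is Dict.getD.
def tpPass (graph : List (String × List String)) :
    List String → PySem.Set String → PySem.Set String → List String →
    PySem.Set String × PySem.Set String × List String
  | [], seen, c, g => (seen, c, g)
  | n :: rest, seen, c, g =>
    if PySem.Set.contains seen n then
      tpPass graph rest seen c g
    else
      let seen' := PySem.Set.add seen n
      let children := PySem.Dict.getD (PySem.Dict.mk graph) n []
      tpPass graph rest seen' (PySem.Set.add c n)
        (g ++ children.filter (fun x => !PySem.Set.contains seen' x))

-- Termination fact tpLoopB cites: one pass never increases the measure (`diff`·(tpM+2) + frontier size).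
theorem tpPass_phi (graph : List (String × List String)) (f : List String)
    (seen c : PySem.Set String) (g : List String) :
    (PySem.Set.diff (tpU graph) (tpPass graph f seen c g).1).length * (tpM graph + 2)
        + (tpPass graph f seen c g).2.2.length
      ≤ (PySem.Set.diff (tpU graph) seen).length * (tpM graph + 2) + g.length := by
  induction f generalizing seen c g with
  | nil => simp [tpPass]
  | cons n rest ih =>
    rw [tpPass]
    split
    · exact ih seen c g
    · rename_i hs
      refine le_trans (ih _ _ _) ?_
      rcases hget : (PySem.Dict.mk graph).get? n with _ | ch
      · have : PySem.Dict.getD (PySem.Dict.mk graph) n [] = [] := by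
          simp [PySem.Dict.getD, hget]
        rw [this]
        simp only [List.filter_nil, List.append_nil]
        have := Nat.mul_le_mul_right (tpM graph + 2) (tpDiff_add_le (tpU graph) seen n)
        omega
      · have hg : PySem.Dict.getD (PySem.Dict.mk graph) n [] = ch := by
          simp [PySem.Dict.getD, hget]
        rw [hg]
        have h := tpGet_some graph n ch hget
        have hlt := tpDiff_add_lt (tpU graph) seen n h.1 (by simpa using hs)
        have hlen : (ch.filter (fun x => !PySem.Set.contains (PySem.Set.add seen n) x)).length
            ≤ tpM graph := le_trans (List.length_filter_le _ _) h.2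
        simp only [List.length_append]
        nlinarith [hlt, hlen]

-- Source B's `while f1 or f2:` level loop: pass over f1 into cluster1, then over f2 into cluster2.
def tpLoopB (graph : List (String × List String)) :
    List String → List String → PySem.Set String → PySem.Set String → PySem.Set String →
    PySem.Set String × PySem.Set String
  | f1, f2, seen, c1, c2 =>
    if f1.isEmpty && f2.isEmpty then (c1, c2)
    else
      let r1 := tpPass graph f1 seen c1 []
      let r2 := tpPass graph f2 r1.1 c2 []
      tpLoopB graph r1.2.2 r2.2.2 r2.1 r1.2.1 r2.2.1
termination_by f1 f2 seen _ _ =>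
  (PySem.Set.diff (tpU graph) seen).length * (tpM graph + 2) + f1.length + f2.length
decreasing_by
  have h1 := tpPass_phi graph f1 seen c1 []
  have h2 := tpPass_phi graph f2 (tpPass graph f1 seen c1 []).1 c2 []
  rename_i hne
  have hf : 1 ≤ f1.length + f2.length := by
    rcases f1 with _ | ⟨a, f1⟩
    · rcases f2 with _ | ⟨b, f2⟩
      · simp at hne
      · simp
    · simp
      omega
  simp only [List.length_nil] at h1 h2
  omega

def try_partition_alt (graph : List (String × List String)) (node1 : String) (node2 : String) :
    List String × List String :=
  tpLoopB graph [node1] [node2] PySem.Set.empty PySem.Set.empty PySem.Set.empty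

-- ===== PRECONDITION & SPEC =====
def Spec_try_partition (graph : List (String × List String)) (node1 : String) (node2 : String) (out : List String × List String) : Prop := out = try_partition_alt graph node1 node2
instance (graph : List (String × List String)) (node1 : String) (node2 : String) (out : List String × List String) : Decidable (Spec_try_partition graph node1 node2 out) := by unfold Spec_try_partition; infer_instance

-- ===== CLAIM (what is proved, stated in full; the proofs are below) =====
def Claim_equal_try_partition : Prop := ∀ (graph : List (String × List String)) (node1 : String) (node2 : String), Dom_try_partition graph node1 node2 → Spec_try_partition graph node1 node2 (try_partition graph node1 node2)

-- ===== LEMMAS AND PROOFS =====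

-- Phase 1: A's loop consumes the tag-true frontier block `f1` at the queue's head; its claims and
-- cluster1 additions are exactly one tpPass, and the filtered children pile up (tagged true) behind
-- `tailQ` in the accumulator block `acc`.
theorem tpPhase1 (graph : List (String × List String)) (f1 : List String)
    (tailQ : List (String × Bool)) (acc : List String)
    (seen c1 c2 : PySem.Set String) :
    tpLoopA graph (f1.map (fun n => (n, true)) ++ tailQ ++ acc.map (fun n => (n, true))) seen c1 c2
      = tpLoopA graph (tailQ ++ ((tpPass graph f1 seen c1 acc).2.2).map (fun n => (n, true)))
          (tpPass graph f1 seen c1 acc).1 (tpPass graph f1 seen c1 acc).2.1 c2 := by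
  induction f1 generalizing acc seen c1 with
  | nil => simp [tpPass]
  | cons n rest ih =>
    rw [List.map_cons, List.cons_append, List.cons_append, tpLoopA, tpPass]
    split
    · exact ih acc seen c1
    · dsimp only
      rcases hget : (PySem.Dict.mk graph).get? n with _ | ch
      · have hgd : PySem.Dict.getD (PySem.Dict.mk graph) n [] = [] := by
          simp [PySem.Dict.getD, hget]
        rw [hgd]
        simpa using ih acc (PySem.Set.add seen n) (PySem.Set.add c1 n)
      · have hgd : PySem.Dict.getD (PySem.Dict.mk graph) n [] = ch := by
          simp [PySem.Dict.getD, hget]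
        rw [hgd]
        have := ih (acc ++ ch.filter (fun x => !PySem.Set.contains (PySem.Set.add seen n) x))
          (PySem.Set.add seen n) (PySem.Set.add c1 n)
        simpa using this

-- Phase 2: the same for the tag-false block and cluster2.
theorem tpPhase2 (graph : List (String × List String)) (f2 : List String)
    (tailQ : List (String × Bool)) (acc : List String)
    (seen c1 c2 : PySem.Set String) :
    tpLoopA graph (f2.map (fun n => (n, false)) ++ tailQ ++ acc.map (fun n => (n, false))) seen c1 c2
      = tpLoopA graph (tailQ ++ ((tpPass graph f2 seen c2 acc).2.2).map (fun n => (n, false)))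
          (tpPass graph f2 seen c2 acc).1 c1 (tpPass graph f2 seen c2 acc).2.1 := by
  induction f2 generalizing acc seen c2 with
  | nil => simp [tpPass]
  | cons n rest ih =>
    rw [List.map_cons, List.cons_append, List.cons_append, tpLoopA, tpPass]
    split
    · exact ih acc seen c2
    · dsimp only
      rcases hget : (PySem.Dict.mk graph).get? n with _ | ch
      · have hgd : PySem.Dict.getD (PySem.Dict.mk graph) n [] = [] := by
          simp [PySem.Dict.getD, hget]
        rw [hgd]
        simpa using ih acc (PySem.Set.add seen n) (PySem.Set.add c2 n)
      · have hgd : PySem.Dict.getD (PySem.Dict.mk graph) n [] = ch := by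
          simp [PySem.Dict.getD, hget]
        rw [hgd]
        have := ih (acc ++ ch.filter (fun x => !PySem.Set.contains (PySem.Set.add seen n) x))
          (PySem.Set.add seen n) (PySem.Set.add c2 n)
        simpa using this

-- A's queue invariant: at the start of each round the deque is exactly the tag-true frontier
-- followed by the tag-false frontier, so one round of tpLoopB (phase 1 then phase 2) tracks it.
theorem tpLoopAB (graph : List (String × List String)) (f1 f2 : List String)
    (seen c1 c2 : PySem.Set String) :
    tpLoopB graph f1 f2 seen c1 c2
      = tpLoopA graph (f1.map (fun n => (n, true)) ++ f2.map (fun n => (n, false))) seen c1 c2 := by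
  fun_induction tpLoopB graph f1 f2 seen c1 c2 with
  | case1 f1 f2 seen c1 c2 hemp =>
    obtain ⟨h1, h2⟩ := by simpa [List.isEmpty_iff] using hemp
    subst h1; subst h2
    simp [tpLoopA]
  | case2 f1 f2 seen c1 c2 hemp r1 r2 ih =>
    have p1 := tpPhase1 graph f1 (f2.map (fun n => (n, false))) [] seen c1 c2
    have p2 := tpPhase2 graph f2 ((tpPass graph f1 seen c1 []).2.2.map (fun n => (n, true))) []
      (tpPass graph f1 seen c1 []).1 (tpPass graph f1 seen c1 []).2.1 c2
    simp only [List.map_nil, List.append_nil] at p1 p2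
    rw [p1, p2, ← ih]

-- ===== VERDICT (by name: the statement is the Claim_ definition above) =====
theorem try_partition_spec : Claim_equal_try_partition := by
  intro graph node1 node2 _
  show try_partition graph node1 node2 = try_partition_alt graph node1 node2
  unfold try_partition try_partition_alt
  rw [tpLoopAB]
  rfl
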